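-- pv_equiv track=rewrite | github.com/pypi-data/pypi-mirror-99 | packages/nanovar/nanovar-1.3.9.tar.gz/nanovar-1.3.9/nanovar/nv_cluster.py | mainclasssv
-- ===== SOURCE A (Python) =====
-- from collections import OrderedDict, defaultdict
--
-- def mainclasssv(reads, classdict, hsb_switch):
--     if hsb_switch:
--         tier3sv = ['Inv2', 'Inter-Ins', 'Intra-Ins2', 'TDupl']
--         tierxsv = ['Intra-Ins', 'Inter']
--         tier2sv = ['Inv', 'Del', 'Nov_Ins']
--         tier1sv = ['bp_Nov_Ins']
--     else:
--         tier3sv = ['Inv2', 'Inter-Ins', 'Intra-Ins2']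
--         tierxsv = ['Intra-Ins', 'Inter']
--         tier2sv = ['Inv', 'Del', 'TDupl', 'Nov_Ins']
--         tier1sv = ['bp_Nov_Ins']
--     tmpdict = defaultdict(int)
--     for read in reads:
--         svclass = classdict[read]
--         tmpdict[svclass] += 1
--     if any(y in tier3sv for y in tmpdict):
--         for s in tierxsv:
--             try:
--                 del tmpdict[s]
--             except KeyError:
--                 pass
--         for s in tier2sv:
--             try:
--                 del tmpdict[s]
--             except KeyError:
--                 pass
--         try:
--             del tmpdict["bp_Nov_Ins"]
--         except KeyError:
--             pass
--     elif any(y in tierxsv for y in tmpdict):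
--         for s in tier2sv:
--             try:
--                 del tmpdict[s]
--             except KeyError:
--                 pass
--         try:
--             del tmpdict["bp_Nov_Ins"]
--         except KeyError:
--             pass
--     elif any(y in tier2sv for y in tmpdict):
--         try:
--             del tmpdict["bp_Nov_Ins"]
--         except KeyError:
--             pass
--     elif any(y in tier1sv for y in tmpdict):
--         pass
--     else:
--         a = ','.join([y for y in tmpdict])
--         raise Exception("Error: Unknown SV class %s, %s" % (a, ','.join(reads)))
--     mainsvclass = [key for (key, value) in sorted(tmpdict.items(), key=lambda x: x[1], reverse=True)][0]
--     return mainsvclass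
-- ===== SOURCE B (Python) =====
-- from collections import defaultdict
--
--
-- def mainclasssv(reads, classdict, hsb_switch):
--     rank = {'Inv2': 4, 'Inter-Ins': 4, 'Intra-Ins2': 4,
--             'Intra-Ins': 3, 'Inter': 3,
--             'Inv': 2, 'Del': 2, 'Nov_Ins': 2,
--             'bp_Nov_Ins': 1}
--     rank['TDupl'] = 4 if hsb_switch else 2
--     counts = defaultdict(int)
--     for read in reads:
--         counts[classdict[read]] += 1
--     top = 0
--     for c in counts:
--         top = max(top, rank.get(c, 0))
--     if top == 0:
--         a = ','.join([y for y in counts])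
--         raise Exception("Error: Unknown SV class %s, %s" % (a, ','.join(reads)))
--     return max((c for c in counts if rank.get(c, 0) in (0, top)),
--                key=lambda c: counts[c])
-- ===== Notes on version B (the rewrite author's own statement) =====
-- stated objective: simpler
-- what changed: Replaces A's four-branch cascade of try/del tier deletions followed by a full stable reverse sort with a single rank map (tier -> 1..4), one max-rank pass, one filter keeping only top-rank and unknown classes, and a first-maximum max() instead of sorting.
import Mathlib
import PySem

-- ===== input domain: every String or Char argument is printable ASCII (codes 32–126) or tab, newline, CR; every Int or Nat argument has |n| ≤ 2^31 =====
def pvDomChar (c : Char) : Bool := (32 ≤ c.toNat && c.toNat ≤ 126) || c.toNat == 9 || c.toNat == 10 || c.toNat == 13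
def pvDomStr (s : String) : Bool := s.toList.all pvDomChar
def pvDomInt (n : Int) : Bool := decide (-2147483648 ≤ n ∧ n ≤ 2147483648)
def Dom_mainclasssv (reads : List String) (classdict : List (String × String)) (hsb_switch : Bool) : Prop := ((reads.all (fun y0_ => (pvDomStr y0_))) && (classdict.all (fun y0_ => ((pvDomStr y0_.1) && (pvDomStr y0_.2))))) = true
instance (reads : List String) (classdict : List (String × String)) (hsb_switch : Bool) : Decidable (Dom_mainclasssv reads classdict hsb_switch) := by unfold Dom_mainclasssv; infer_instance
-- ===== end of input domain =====

-- ===== PORT A =====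
-- B picks the dominant SV class via a rank map and a single filtered max instead of A's
-- four-branch cascade of tier deletions followed by a full sort; objective: simpler.
def mainclasssv (reads : List String) (classdict : List (String × String)) (hsb_switch : Bool) : String :=
  let tier3sv := if hsb_switch then ["Inv2", "Inter-Ins", "Intra-Ins2", "TDupl"] else ["Inv2", "Inter-Ins", "Intra-Ins2"]
  let tierxsv := ["Intra-Ins", "Inter"]
  let tier2sv := if hsb_switch then ["Inv", "Del", "Nov_Ins"] else ["Inv", "Del", "TDupl", "Nov_Ins"]
  let tier1sv := ["bp_Nov_Ins"]
  let cd := PySem.Dict.mk classdict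
  -- classdict[read]: KeyError (excluded by Pre_) totalized with ""
  let tmpdict := reads.foldl (fun d read => d.modify ((cd.get? read).getD "") (0 : Int) (· + 1)) PySem.Dict.empty
  let sel : Option (PySem.Dict String Int) :=
    if tmpdict.keys.any (fun y => tier3sv.contains y) then
      let t := tierxsv.foldl (fun d s => d.erase s) tmpdict
      let t := tier2sv.foldl (fun d s => d.erase s) t
      some (t.erase "bp_Nov_Ins")
    else if tmpdict.keys.any (fun y => tierxsv.contains y) then
      let t := tier2sv.foldl (fun d s => d.erase s) tmpdict
      some (t.erase "bp_Nov_Ins")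
    else if tmpdict.keys.any (fun y => tier2sv.contains y) then
      some (tmpdict.erase "bp_Nov_Ins")
    else if tmpdict.keys.any (fun y => tier1sv.contains y) then
      some tmpdict
    else
      none  -- Python raises Exception here (excluded by Pre_)
  match sel with
  | none => ""
  | some t =>
    -- [key for (key, value) in sorted(...)][0]; the list is nonempty whenever Python reaches this line
    ((PySem.List.sorted t.items (fun x => x.2) true).map (fun p => p.1)).headD ""

-- ===== PORT B =====
def mainclasssv_alt (reads : List String) (classdict : List (String × String)) (hsb_switch : Bool) : String :=
  let rank0 := PySem.Dict.mk [("Inv2", (4 : Int)), ("Inter-Ins", 4), ("Intra-Ins2", 4),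
    ("Intra-Ins", 3), ("Inter", 3), ("Inv", 2), ("Del", 2), ("Nov_Ins", 2), ("bp_Nov_Ins", 1)]
  let rank := rank0.insert "TDupl" (if hsb_switch then 4 else 2)
  let cd := PySem.Dict.mk classdict
  -- classdict[read]: KeyError (excluded by Pre_) totalized with ""
  let counts := reads.foldl (fun d read => d.modify ((cd.get? read).getD "") (0 : Int) (· + 1)) PySem.Dict.empty
  let top := counts.keys.foldl (fun t c => max t (rank.getD c 0)) 0
  if top == 0 then ""  -- Python raises Exception here (excluded by Pre_)
  else
    (PySem.List.max? (counts.keys.filter (fun c => rank.getD c 0 == 0 || rank.getD c 0 == top))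
      (fun c => counts.getD c 0)).getD ""

-- ===== PRECONDITION & SPEC =====
-- Pre_ excludes the inputs where the Python raises: a read missing from classdict (KeyError)
-- and inputs whose reads map to no known SV class (the explicit 'Unknown SV class' Exception).
def Pre_mainclasssv (reads : List String) (classdict : List (String × String)) (hsb_switch : Bool) : Prop :=
  (∀ r ∈ reads, ∃ p ∈ classdict, p.1 = r) ∧
  (∃ r ∈ reads, ((PySem.Dict.mk classdict).get? r).getD "" ∈
    ["Inv2", "Inter-Ins", "Intra-Ins2", "TDupl", "Intra-Ins", "Inter", "Inv", "Del", "Nov_Ins", "bp_Nov_Ins"])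
instance (reads : List String) (classdict : List (String × String)) (hsb_switch : Bool) : Decidable (Pre_mainclasssv reads classdict hsb_switch) := by unfold Pre_mainclasssv; infer_instance
def pvWitness_mainclasssv : List String × (List (String × String)) × Bool := (["r1", "r2"], [("r1", "Del"), ("r2", "Inv")], false)
def Spec_mainclasssv (reads : List String) (classdict : List (String × String)) (hsb_switch : Bool) (out : String) : Prop := out = mainclasssv_alt reads classdict hsb_switch
instance (reads : List String) (classdict : List (String × String)) (hsb_switch : Bool) (out : String) : Decidable (Spec_mainclasssv reads classdict hsb_switch out) := by unfold Spec_mainclasssv; infer_instance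

-- ===== CLAIM (what is proved, stated in full; the proofs are below) =====
def Claim_equal_mainclasssv : Prop := ∀ (reads : List String) (classdict : List (String × String)) (hsb_switch : Bool), Dom_mainclasssv reads classdict hsb_switch → Pre_mainclasssv reads classdict hsb_switch → Spec_mainclasssv reads classdict hsb_switch (mainclasssv reads classdict hsb_switch)

-- ===== LEMMAS AND PROOFS =====
set_option maxHeartbeats 1000000

-- head of a reverse-stable insertion updates like the 'first maximum' fold step
theorem head?_insertBy {α κ : Type} [LinearOrder κ] (key : α → κ) (x : α) (acc : List α) :
    (PySem.List.insertBy (fun a b => decide (key b < key a)) x acc).head? =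
      some (match acc with | [] => x | m :: _ => if key m < key x then x else m) := by
  cases acc with
  | nil => simp [PySem.List.insertBy]
  | cons m t =>
    by_cases h : key m < key x <;> simp [PySem.List.insertBy, h]

theorem head?_foldl_insertBy {α κ : Type} [LinearOrder κ] (key : α → κ) (xs : List α) :
    ∀ acc : List α,
      (xs.foldl (fun acc x => PySem.List.insertBy (fun a b => decide (key b < key a)) x acc) acc).head? =
        xs.foldl (fun o x => match o with
          | none => some x
          | some m => if key m < key x then some x else some m) acc.head? := by
  induction xs with
  | nil => intro acc; rfl
  | cons x xs ih =>
    intro acc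
    simp only [List.foldl_cons]
    rw [ih]
    congr 1
    rw [head?_insertBy]
    cases acc with
    | nil => rfl
    | cons m t => by_cases h : key m < key x <;> simp [h]

-- head of Python's stable sorted(..., reverse=True) is Python's first maximal element
theorem head?_sorted_rev_eq_max? {α κ : Type} [LinearOrder κ] (xs : List α) (key : α → κ) :
    (PySem.List.sorted xs key true).head? = PySem.List.max? xs key := by
  rw [PySem.List.sorted_rev_eq_foldl_insertBy, head?_foldl_insertBy]
  rfl

theorem max?_map {α β κ : Type} [LinearOrder κ] (f : α → β) (key : β → κ) (l : List α) :
    PySem.List.max? (l.map f) key = (PySem.List.max? l (fun x => key (f x))).map f := by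
  show (l.map f).foldl _ none = ((l.foldl _ none).map f)
  rw [List.foldl_map]
  suffices h : ∀ o : Option α,
      l.foldl (fun acc x => match acc with
        | none => some (f x)
        | some m => if key m < key (f x) then some (f x) else some m) (o.map f) =
      (l.foldl (fun acc x => match acc with
        | none => some x
        | some m => if key (f m) < key (f x) then some x else some m) o).map f by
    exact h none
  induction l with
  | nil => intro o; rfl
  | cons x xs ih =>
    intro o
    simp only [List.foldl_cons]
    cases o with
    | none => exact ih (some x)
    | some m =>
      by_cases h : key (f m) < key (f x) <;> simp only [Option.map_some, h, if_pos, ite_false] <;>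
        [exact ih (some x); exact ih (some m)]

theorem foldl_max_le_int {α : Type} (f : α → Int) (B : Int) (l : List α) :
    ∀ init : Int, init ≤ B → (∀ x ∈ l, f x ≤ B) → l.foldl (fun a x => max a (f x)) init ≤ B := by
  induction l with
  | nil => intro i h _; exact h
  | cons x xs ih =>
    intro i hi hall
    simp only [List.foldl_cons]
    exact ih _ (max_le hi (hall x (by simp))) (fun y hy => hall y (by simp [hy]))

-- a chain of dict deletions is one filter over the items
theorem erase_foldl_items (S : List String) :
    ∀ d : PySem.Dict String Int,
      (S.foldl (fun d s => d.erase s) d).items = d.items.filter (fun p => !S.contains p.1) := by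
  induction S with
  | nil => intro d; simp
  | cons s S ih =>
    intro d
    simp only [List.foldl_cons]
    rw [ih]
    show (d.items.filter _).filter _ = _
    rw [List.filter_filter]
    apply List.filter_congr
    intro p _
    by_cases h1 : s = p.1 <;> by_cases h2 : p.1 ∈ S
    · simp [h1, h2]
    · simp [h1, h2]
    · simp [h1, h2, Ne.symm h1]
    · simp [h1, h2, Ne.symm h1]

theorem headD_sorted_map (l : List (String × Int)) :
    ((PySem.List.sorted l (fun x => x.2) true).map (fun p => p.1)).headD "" =
      ((PySem.List.max? l (fun x => x.2)).map (fun p => p.1)).getD "" := by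
  rw [List.headD_eq_head?_getD, List.head?_map, head?_sorted_rev_eq_max?]

-- A's branch value (filter + stable reverse sort + head) as B's filtered first max
theorem branch_eq (d : PySem.Dict String Int) (hnd : d.keys.Nodup) (rk : String → Int) (top : Int) (R : List String)
    (hpt : ∀ k ∈ d.keys, (!R.contains k) = (rk k == 0 || rk k == top)) :
    ((PySem.List.sorted (d.items.filter (fun p => !R.contains p.1)) (fun x => x.2) true).map (fun p => p.1)).headD "" =
      (PySem.List.max? (d.keys.filter (fun c => rk c == 0 || rk c == top)) (fun c => d.getD c 0)).getD "" := by
  rw [headD_sorted_map, PySem.Dict.items_eq_map_keys d hnd 0, List.filter_map, max?_map,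
    Option.map_map]
  have h1 : ((fun p : String × Int => p.1) ∘ (fun k => (k, d.getD k 0))) = id := rfl
  rw [h1, Option.map_id]
  have h2 : d.keys.filter ((fun p : String × Int => !R.contains p.1) ∘ (fun k => (k, d.getD k 0)))
      = d.keys.filter (fun c => rk c == 0 || rk c == top) :=
    List.filter_congr (fun k hk => hpt k hk)
  rw [h2]
  rfl

-- B's rank map as a function of the class name
def rkOf (hsb : Bool) : String → Int := fun c =>
  ((PySem.Dict.mk [("Inv2", (4 : Int)), ("Inter-Ins", 4), ("Intra-Ins2", 4),
    ("Intra-Ins", 3), ("Inter", 3), ("Inv", 2), ("Del", 2), ("Nov_Ins", 2), ("bp_Nov_Ins", 1)]).insert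
      "TDupl" (if hsb then 4 else 2)).getD c 0

theorem rk_unfold (hsb : Bool) (c : String) : rkOf hsb c =
    if c = "Inv2" then 4 else if c = "Inter-Ins" then 4 else if c = "Intra-Ins2" then 4
    else if c = "Intra-Ins" then 3 else if c = "Inter" then 3
    else if c = "Inv" then 2 else if c = "Del" then 2 else if c = "Nov_Ins" then 2
    else if c = "bp_Nov_Ins" then 1
    else if c = "TDupl" then (if hsb then 4 else 2) else 0 := by
  unfold rkOf
  rw [PySem.Dict.getD_insert]
  by_cases ht : c = "TDupl"
  · subst ht; simp [PySem.Dict.get?_mk_cons]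
  · simp only [ht, if_false]
    simp only [PySem.Dict.getD, PySem.Dict.get?, List.find?_cons]
    split_ifs with h1 h2 h3 h4 h5 h6 h7 h8 h9
    · simp_all
    · simp_all
    · simp_all
    · simp_all
    · simp_all
    · simp_all
    · simp_all
    · simp_all
    · simp_all
    · have e1 : (("Inv2" : String) == c) = false := by simp [Ne.symm h1]
      have e2 : (("Inter-Ins" : String) == c) = false := by simp [Ne.symm h2]
      have e3 : (("Intra-Ins2" : String) == c) = false := by simp [Ne.symm h3]
      have e4 : (("Intra-Ins" : String) == c) = false := by simp [Ne.symm h4]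
      have e5 : (("Inter" : String) == c) = false := by simp [Ne.symm h5]
      have e6 : (("Inv" : String) == c) = false := by simp [Ne.symm h6]
      have e7 : (("Del" : String) == c) = false := by simp [Ne.symm h7]
      have e8 : (("Nov_Ins" : String) == c) = false := by simp [Ne.symm h8]
      have e9 : (("bp_Nov_Ins" : String) == c) = false := by simp [Ne.symm h9]
      simp only [e1, e2, e3, e4, e5, e6, e7, e8, e9]
      rfl

theorem rk_H4T : ∀ c, c ∈ ["Inv2", "Inter-Ins", "Intra-Ins2", "TDupl"] ↔ rkOf true c = 4 := by
  intro c; rw [rk_unfold]; split_ifs <;> first | (subst_vars; decide) | (simp [*]; try exact absurd rfl (by assumption))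
theorem rk_H4F : ∀ c, c ∈ ["Inv2", "Inter-Ins", "Intra-Ins2"] ↔ rkOf false c = 4 := by
  intro c; rw [rk_unfold]; split_ifs <;> first | (subst_vars; decide) | (simp [*]; try exact absurd rfl (by assumption))
theorem rk_H3 (hsb : Bool) : ∀ c, c ∈ ["Intra-Ins", "Inter"] ↔ rkOf hsb c = 3 := by
  intro c; rw [rk_unfold]; split_ifs <;> first | (subst_vars; decide) | (simp [*]; try exact absurd rfl (by assumption))
theorem rk_H2T : ∀ c, c ∈ ["Inv", "Del", "Nov_Ins"] ↔ rkOf true c = 2 := by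
  intro c; rw [rk_unfold]; split_ifs <;> first | (subst_vars; decide) | (simp [*]; try exact absurd rfl (by assumption))
theorem rk_H2F : ∀ c, c ∈ ["Inv", "Del", "TDupl", "Nov_Ins"] ↔ rkOf false c = 2 := by
  intro c; rw [rk_unfold]; split_ifs <;> first | (subst_vars; decide) | (simp [*]; try exact absurd rfl (by assumption))
theorem rk_H1 (hsb : Bool) : ∀ c, c = "bp_Nov_Ins" ↔ rkOf hsb c = 1 := by
  intro c; rw [rk_unfold]; split_ifs <;> first | (subst_vars; decide) | (simp [*]; try exact absurd rfl (by assumption))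
theorem rk_HB (hsb : Bool) : ∀ c, 0 ≤ rkOf hsb c ∧ rkOf hsb c ≤ 4 := by
  intro c; rw [rk_unfold]; split_ifs <;> omega
theorem rk_big (hsb : Bool) : ∀ c ∈ ["Inv2", "Inter-Ins", "Intra-Ins2", "TDupl", "Intra-Ins",
    "Inter", "Inv", "Del", "Nov_Ins", "bp_Nov_Ins"], rkOf hsb c ≠ 0 := by
  intro c hc
  fin_cases hc <;> cases hsb <;> decide

-- A's tail after counting, abstracted over the tier lists
def atail (t3 tx t2 t1 : List String) (d : PySem.Dict String Int) : String :=
  let sel : Option (PySem.Dict String Int) :=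
    if d.keys.any (fun y => t3.contains y) then
      let t := tx.foldl (fun d s => d.erase s) d
      let t := t2.foldl (fun d s => d.erase s) t
      some (t.erase "bp_Nov_Ins")
    else if d.keys.any (fun y => tx.contains y) then
      let t := t2.foldl (fun d s => d.erase s) d
      some (t.erase "bp_Nov_Ins")
    else if d.keys.any (fun y => t2.contains y) then
      some (d.erase "bp_Nov_Ins")
    else if d.keys.any (fun y => t1.contains y) then
      some d
    else
      none
  match sel with
  | none => ""
  | some t => ((PySem.List.sorted t.items (fun x => x.2) true).map (fun p => p.1)).headD ""

-- B's tail after counting, abstracted over the rank function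
def btail (rk : String → Int) (d : PySem.Dict String Int) : String :=
  let top := d.keys.foldl (fun t c => max t (rk c)) 0
  if top == 0 then ""
  else (PySem.List.max? (d.keys.filter (fun c => rk c == 0 || rk c == top)) (fun c => d.getD c 0)).getD ""

-- the heart: A's cascade of tier deletions + stable reverse sort equals B's rank-filtered first max
theorem core (rk : String → Int) (t3 tx t2 t1 : List String)
    (H4 : ∀ c, c ∈ t3 ↔ rk c = 4) (H3 : ∀ c, c ∈ tx ↔ rk c = 3)
    (H2 : ∀ c, c ∈ t2 ↔ rk c = 2) (H1 : ∀ c, c = "bp_Nov_Ins" ↔ rk c = 1)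
    (Ht1 : t1 = ["bp_Nov_Ins"])
    (HB : ∀ c, 0 ≤ rk c ∧ rk c ≤ 4)
    (d : PySem.Dict String Int) (hnd : d.keys.Nodup)
    (hpre : ∃ k ∈ d.keys, rk k ≠ 0) :
    atail t3 tx t2 t1 d = btail rk d := by
  have hlb := PySem.List.le_foldl_max_int d.keys rk 0
  by_cases h3 : d.keys.any (fun y => t3.contains y) = true
  · obtain ⟨k, hk, hk3⟩ : ∃ k ∈ d.keys, k ∈ t3 := by simpa using h3
    have htop : d.keys.foldl (fun t c => max t (rk c)) 0 = 4 :=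
      le_antisymm (foldl_max_le_int rk 4 d.keys 0 (by norm_num) (fun c _ => (HB c).2))
        (((H4 k).1 hk3) ▸ hlb.2 k hk)
    have hAitems : ((t2.foldl (fun d s => d.erase s) (tx.foldl (fun d s => d.erase s) d)).erase "bp_Nov_Ins").items
        = d.items.filter (fun p => !(tx ++ t2 ++ ["bp_Nov_Ins"]).contains p.1) := by
      show ((t2.foldl (fun d s => d.erase s) (tx.foldl (fun d s => d.erase s) d)).items.filter _) = _
      rw [erase_foldl_items, erase_foldl_items, List.filter_filter, List.filter_filter]
      apply List.filter_congr
      intro p _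
      by_cases e1 : p.1 ∈ tx <;> by_cases e2 : p.1 ∈ t2 <;> by_cases e3 : p.1 = "bp_Nov_Ins" <;>
        simp [e1, e2, e3]
    have hpt : ∀ k ∈ d.keys, (!((tx ++ t2 ++ ["bp_Nov_Ins"]).contains k)) = (rk k == 0 || rk k == (4:Int)) := by
      intro c _
      have hb := HB c
      rw [Bool.eq_iff_iff]
      simp [List.mem_append, H3 c, H2 c, H1 c]
      omega
    simp only [atail, btail, h3, if_true, htop]
    rw [hAitems]
    exact branch_eq d hnd rk 4 (tx ++ t2 ++ ["bp_Nov_Ins"]) hpt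
  · have hn4 : ∀ c ∈ d.keys, rk c ≠ 4 := by
      intro c hc he
      exact h3 (List.any_eq_true.2 ⟨c, hc, by simp [List.contains_eq_mem, (H4 c).2 he]⟩)
    by_cases hx : d.keys.any (fun y => tx.contains y) = true
    · obtain ⟨k, hk, hkx⟩ : ∃ k ∈ d.keys, k ∈ tx := by simpa using hx
      have htop : d.keys.foldl (fun t c => max t (rk c)) 0 = 3 := by
        apply le_antisymm
        · apply foldl_max_le_int rk 3 d.keys 0 (by norm_num)
          intro c hc
          have := HB c; have := hn4 c hc; omega
        · exact ((H3 k).1 hkx) ▸ hlb.2 k hk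
      have hAitems : ((t2.foldl (fun d s => d.erase s) d).erase "bp_Nov_Ins").items
          = d.items.filter (fun p => !(t2 ++ ["bp_Nov_Ins"]).contains p.1) := by
        show ((t2.foldl (fun d s => d.erase s) d).items.filter _) = _
        rw [erase_foldl_items, List.filter_filter]
        apply List.filter_congr
        intro p _
        by_cases e2 : p.1 ∈ t2 <;> by_cases e3 : p.1 = "bp_Nov_Ins" <;> simp [e2, e3]
      have hpt : ∀ k ∈ d.keys, (!((t2 ++ ["bp_Nov_Ins"]).contains k)) = (rk k == 0 || rk k == (3:Int)) := by
        intro c hc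
        have hb := HB c
        have h4c := hn4 c hc
        rw [Bool.eq_iff_iff]
        simp [List.mem_append, H2 c, H1 c]
        omega
      simp only [atail, btail, h3, hx, if_true, if_false, Bool.false_eq_true, htop]
      rw [hAitems]
      exact branch_eq d hnd rk 3 (t2 ++ ["bp_Nov_Ins"]) hpt
    · have hn3 : ∀ c ∈ d.keys, rk c ≠ 3 := by
        intro c hc he
        exact hx (List.any_eq_true.2 ⟨c, hc, by simp [List.contains_eq_mem, (H3 c).2 he]⟩)
      by_cases h2 : d.keys.any (fun y => t2.contains y) = true
      · obtain ⟨k, hk, hk2⟩ : ∃ k ∈ d.keys, k ∈ t2 := by simpa using h2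
        have htop : d.keys.foldl (fun t c => max t (rk c)) 0 = 2 := by
          apply le_antisymm
          · apply foldl_max_le_int rk 2 d.keys 0 (by norm_num)
            intro c hc
            have := HB c; have := hn4 c hc; have := hn3 c hc; omega
          · exact ((H2 k).1 hk2) ▸ hlb.2 k hk
        have hAitems : (d.erase "bp_Nov_Ins").items
            = d.items.filter (fun p => !(["bp_Nov_Ins"] : List String).contains p.1) := by
          show d.items.filter _ = _
          apply List.filter_congr
          intro p _
          by_cases e3 : p.1 = "bp_Nov_Ins" <;> simp [e3]
        have hpt : ∀ k ∈ d.keys, (!((["bp_Nov_Ins"] : List String).contains k)) = (rk k == 0 || rk k == (2:Int)) := by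
          intro c hc
          have hb := HB c
          have h4c := hn4 c hc; have h3c := hn3 c hc
          rw [Bool.eq_iff_iff]
          simp [H1 c]
          omega
        simp only [atail, btail, h3, hx, h2, if_true, if_false, Bool.false_eq_true, htop]
        rw [hAitems]
        exact branch_eq d hnd rk 2 ["bp_Nov_Ins"] hpt
      · have hn2 : ∀ c ∈ d.keys, rk c ≠ 2 := by
          intro c hc he
          exact h2 (List.any_eq_true.2 ⟨c, hc, by simp [List.contains_eq_mem, (H2 c).2 he]⟩)
        by_cases h1 : d.keys.any (fun y => t1.contains y) = true
        · obtain ⟨k, hk, hk1⟩ : ∃ k ∈ d.keys, k ∈ t1 := by simpa using h1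
          have hrk1 : rk k = 1 := (H1 k).1 (by simpa [Ht1] using hk1)
          have htop : d.keys.foldl (fun t c => max t (rk c)) 0 = 1 := by
            apply le_antisymm
            · apply foldl_max_le_int rk 1 d.keys 0 (by norm_num)
              intro c hc
              have := HB c; have := hn4 c hc; have := hn3 c hc; have := hn2 c hc; omega
            · exact hrk1 ▸ hlb.2 k hk
          have hAitems : d.items = d.items.filter (fun p => !(([] : List String)).contains p.1) := by
            simp
          have hpt : ∀ k ∈ d.keys, (!(([] : List String).contains k)) = (rk k == 0 || rk k == (1:Int)) := by
            intro c hc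
            have hb := HB c
            have h4c := hn4 c hc; have h3c := hn3 c hc; have h2c := hn2 c hc
            rw [Bool.eq_iff_iff]
            simp
            omega
          simp only [atail, btail, h3, hx, h2, h1, if_true, if_false, Bool.false_eq_true, htop]
          rw [hAitems]
          exact branch_eq d hnd rk 1 [] hpt
        · exfalso
          obtain ⟨k, hk, hk0⟩ := hpre
          have hb := HB k
          have h4c : rk k ≠ 4 := hn4 k hk
          have h3c : rk k ≠ 3 := hn3 k hk
          have h2c : rk k ≠ 2 := hn2 k hk
          have hrk1 : rk k = 1 := by omega
          exact h1 (List.any_eq_true.2 ⟨k, hk, by simp [Ht1, List.contains_eq_mem, (H1 k).2 hrk1]⟩)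

-- the shared counting loop of both ports
def countsOf (reads : List String) (classdict : List (String × String)) : PySem.Dict String Int :=
  reads.foldl (fun d read => d.modify (((PySem.Dict.mk classdict).get? read).getD "") (0 : Int) (· + 1)) PySem.Dict.empty

-- ===== VERDICT (by name: the statement is the Claim_ definition above) =====
theorem mainclasssv_spec : Claim_equal_mainclasssv := by
  intro reads classdict hsb_switch _hdom hpre
  unfold Spec_mainclasssv
  obtain ⟨-, r, hr, hmem⟩ := hpre
  have hnd : (countsOf reads classdict).keys.Nodup := by
    apply PySem.Dict.nodup_keys_foldl_modify_key reads
      (fun read => ((PySem.Dict.mk classdict).get? read).getD "") 0 (fun _ _ => (· + 1)) PySem.Dict.empty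
    simp
  have hkmem : ∀ hsb' : Bool, ∃ k ∈ (countsOf reads classdict).keys, rkOf hsb' k ≠ 0 := by
    intro hsb'
    refine ⟨((PySem.Dict.mk classdict).get? r).getD "", ?_, rk_big hsb' _ hmem⟩
    unfold countsOf
    rw [PySem.Dict.keys_foldl_modify_key reads
      (fun read => ((PySem.Dict.mk classdict).get? read).getD "") 0 (fun _ _ => (· + 1)) PySem.Dict.empty]
    rw [PySem.Dict.keys_empty, PySem.Set.update_nil_left]
    exact (PySem.Set.mem_ofList _ _).2 (List.mem_map_of_mem hr)
  cases hsb_switch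
  · have hA : mainclasssv reads classdict false =
        atail ["Inv2", "Inter-Ins", "Intra-Ins2"] ["Intra-Ins", "Inter"]
          ["Inv", "Del", "TDupl", "Nov_Ins"] ["bp_Nov_Ins"] (countsOf reads classdict) := rfl
    have hB : mainclasssv_alt reads classdict false = btail (rkOf false) (countsOf reads classdict) := rfl
    rw [hA, hB]
    exact core (rkOf false) _ _ _ _ rk_H4F (rk_H3 false) rk_H2F (rk_H1 false) rfl (rk_HB false)
      _ hnd (hkmem false)
  · have hA : mainclasssv reads classdict true =
        atail ["Inv2", "Inter-Ins", "Intra-Ins2", "TDupl"] ["Intra-Ins", "Inter"]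
          ["Inv", "Del", "Nov_Ins"] ["bp_Nov_Ins"] (countsOf reads classdict) := rfl
    have hB : mainclasssv_alt reads classdict true = btail (rkOf true) (countsOf reads classdict) := rfl
    rw [hA, hB]
    exact core (rkOf true) _ _ _ _ rk_H4T (rk_H3 true) rk_H2T (rk_H1 true) rfl (rk_HB true)
      _ hnd (hkmem true)
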